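-- pv_equiv track=rewrite | github.com/Hello-Nuri/Algorithms | 프로그래머스/0/181887. 홀수 vs 짝수/홀수 vs 짝수.py | solution
-- ===== SOURCE A (Python) =====
-- def solution(num_list):
--     answer = 0
--     even = 0
--     odd = 0
--     for i,value in enumerate(num_list):
--         if (i+1) % 2 == 0:
--             even += value
--         if (i+1) % 2 != 0:
--             odd += value
--
--     return max(even,odd)
-- ===== SOURCE B (Python) =====
-- def solution(num_list):
--     total = sum(num_list)
--     d = 0
--     for v in num_list:
--         d = v - d
--     # |d| = |odd_position_sum - even_position_sum|, so max = (total + |d|) // 2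
--     return (total + abs(d)) // 2
-- ===== Notes on version B (the rewrite author's own statement) =====
-- stated objective: alternative
-- what changed: Computes the total sum and an alternating (sign-flipping) sum instead of partitioning by index parity, and obtains the answer via the arithmetic identity max(e,o) = (e+o+|o-e|)//2, with no parity tests and no max.
import Mathlib
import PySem

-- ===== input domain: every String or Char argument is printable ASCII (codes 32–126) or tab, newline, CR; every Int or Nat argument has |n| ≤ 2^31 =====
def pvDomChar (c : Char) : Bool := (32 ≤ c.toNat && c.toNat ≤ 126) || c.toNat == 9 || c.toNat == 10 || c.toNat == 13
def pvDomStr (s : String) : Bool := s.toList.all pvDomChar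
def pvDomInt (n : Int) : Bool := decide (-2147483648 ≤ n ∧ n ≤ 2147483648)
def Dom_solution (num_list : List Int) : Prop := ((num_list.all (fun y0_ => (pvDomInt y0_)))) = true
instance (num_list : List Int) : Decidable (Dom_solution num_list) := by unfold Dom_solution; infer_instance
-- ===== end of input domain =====

-- B replaces A's parity-branching enumerate loop by total sum + alternating sum and the
-- identity max(e,o) = (e+o+|o-e|)//2; same O(n) cost ("alternative").

-- ===== PORT A =====
-- one loop step of A: acc = (even, odd), p = (i, value); both ifs test (i+1) % 2 as in the source
def stepA (acc : Int × Int) (p : Int × Int) : Int × Int :=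
  let even := if PySem.Int.mod (p.1 + 1) 2 = 0 then acc.1 + p.2 else acc.1
  let odd  := if PySem.Int.mod (p.1 + 1) 2 ≠ 0 then acc.2 + p.2 else acc.2
  (even, odd)

def solution (num_list : List Int) : Int :=
  let r := (PySem.List.enumerate num_list).foldl stepA (0, 0)
  max r.1 r.2

-- ===== PORT B =====
-- Source B: total = sum(num_list); d folded by d = v - d; result (total + abs(d)) // 2
def altB (num_list : List Int) : Int :=
  num_list.foldl (fun d v => v - d) 0

def solution_alt (num_list : List Int) : Int :=
  PySem.Int.floordiv (num_list.sum + |altB num_list|) 2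

-- ===== PRECONDITION & SPEC =====
def Spec_solution (num_list : List Int) (out : Int) : Prop := out = solution_alt num_list
instance (num_list : List Int) (out : Int) : Decidable (Spec_solution num_list out) := by unfold Spec_solution; infer_instance

-- ===== CLAIM (what is proved, stated in full; the proofs are below) =====
def Claim_equal_solution : Prop := ∀ (num_list : List Int), Dom_solution num_list → Spec_solution num_list (solution num_list)

-- ===== LEMMAS AND PROOFS =====

-- proof-only helper: (odd-position sum, even-position sum), recursing two elements at a time
def po : List Int → Int × Int
  | [] => (0, 0)
  | [x] => (x, 0)
  | x :: y :: xs => ((po xs).1 + x, (po xs).2 + y)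

theorem pairInduction {α : Type} {P : List α → Prop} (h0 : P [])
    (h1 : ∀ x, P [x]) (h2 : ∀ x y xs, P xs → P (x :: y :: xs)) : ∀ xs, P xs
  | [] => h0
  | [x] => h1 x
  | x :: y :: xs => h2 x y xs (pairInduction h0 h1 h2 xs)

lemma foldlA_eq (xs : List Int) (s : Int) (hs : s % 2 = 0) (e o : Int) :
    (PySem.List.enumerate xs s).foldl stepA (e, o) = (e + (po xs).2, o + (po xs).1) := by
  induction xs using pairInduction generalizing s e o with
  | h0 => simp [PySem.List.enumerate_nil, po]
  | h1 x =>
    have hd : ¬ ((2:Int) ∣ (s + 1)) := by omega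
    simp [PySem.List.enumerate_cons, PySem.List.enumerate_nil, stepA, hd, po, ne_eq]
  | h2 x y xs ih =>
    have hd1 : ¬ ((2:Int) ∣ (s + 1)) := by omega
    have hd2 : (2:Int) ∣ (s + 1 + 1) := by omega
    rw [PySem.List.enumerate_cons, PySem.List.enumerate_cons]
    simp only [List.foldl_cons, stepA, ne_eq, PySem.Int.mod_eq_zero_iff_dvd, hd1, hd2,
      not_false_eq_true, not_true_eq_false, if_true, if_false]
    rw [ih (s + 1 + 1) (by omega) (e + y) (o + x), po]
    simp
    constructor <;> ring

lemma sum_eq_po (xs : List Int) : xs.sum = (po xs).1 + (po xs).2 := by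
  induction xs using pairInduction with
  | h0 => simp [po]
  | h1 x => simp [po]
  | h2 x y xs ih => simp [po, ih]; ring

-- the alternating fold from any start d is ±(odd − even) ∓ d, sign by list-length parity
lemma altB_fold (xs : List Int) (d : Int) :
    xs.foldl (fun d v => v - d) d = (po xs).1 - (po xs).2 - d ∨
    xs.foldl (fun d v => v - d) d = (po xs).2 - (po xs).1 + d := by
  induction xs using pairInduction generalizing d with
  | h0 => right; simp [po]
  | h1 x => left; simp [po]
  | h2 x y xs ih =>
    simp only [List.foldl_cons, po]
    rcases ih (y - (x - d)) with h | h
    · left; rw [h]; ring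
    · right; rw [h]; ring

lemma abs_altB (xs : List Int) : |altB xs| = |(po xs).1 - (po xs).2| := by
  unfold altB
  rcases altB_fold xs 0 with h | h <;> rw [h] <;> [skip; rw [abs_sub_comm]] <;> ring_nf

-- ===== VERDICT (by name: the statement is the Claim_ definition above) =====
theorem solution_spec : Claim_equal_solution := by
  intro l _
  unfold Spec_solution solution solution_alt
  rw [foldlA_eq l 0 (by omega) 0 0, abs_altB, sum_eq_po]
  simp only [zero_add]
  rw [PySem.Int.floordiv_eq_ediv_of_pos (by omega)]
  rcases le_total (po l).1 (po l).2 with h | h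
  · rw [abs_of_nonpos (by omega)]
    have : (po l).1 + (po l).2 + -((po l).1 - (po l).2) = 2 * (po l).2 := by ring
    rw [this, max_eq_left h]
    omega
  · rw [abs_of_nonneg (by omega)]
    have : (po l).1 + (po l).2 + ((po l).1 - (po l).2) = 2 * (po l).1 := by ring
    rw [this, max_eq_right h]
    omega
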